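-- pv_equiv track=rewrite | github.com/snr2042954/PMGROUP7_2nd_attempt | alpha_miner.py | compute_Xw_Yw
-- ===== SOURCE A (Python) =====
-- def compute_Xw_Yw(causality, parallel):
--     """Compute X_w and Y_w sets."""
--     X_w = list(causality)
--     Y_w = list(X_w)
--     merged = []
--
--     for fb in range(2):
--         for i in range(len(X_w)):
--             temp = []
--             for j in range(i, len(X_w)):
--                 if X_w[i][fb] == X_w[j][fb]:
--                     temp.append(X_w[j][1 - fb])
--             if len(temp) > 1 and temp not in parallel:
--                 single = sum(temp, [])
--                 if fb == 0:
--                     merged.append([X_w[i][fb], single])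
--                 else:
--                     merged.append([single, X_w[i][fb]])
--
--     X_w += merged
--     Y_w += merged
--     return X_w, Y_w
-- ===== SOURCE B (Python) =====
-- def compute_Xw_Yw(causality, parallel):
--     """Compute X_w and Y_w sets (grouped-index reimplementation)."""
--     X_w = list(causality)
--     merged = []
--
--     for fb in range(2):
--         # one pass: group opposite sides by fb-key, remember each row's
--         # position inside its group
--         groups = {}
--         pos = []
--         for row in X_w:
--             lst = groups.setdefault(tuple(row[fb]), [])
--             pos.append(len(lst))
--             lst.append(row[1 - fb])
--         # second pass: the candidates for row i are exactly its group's suffix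
--         for i, row in enumerate(X_w):
--             temp = groups[tuple(row[fb])][pos[i]:]
--             if len(temp) > 1 and temp not in parallel:
--                 single = sum(temp, [])
--                 merged.append([row[fb], single] if fb == 0 else [single, row[fb]])
--
--     result = X_w + merged
--     return result, list(result)
-- ===== Notes on version B (the rewrite author's own statement) =====
-- stated objective: alternative
-- what changed: Instead of rescanning the whole list for matching keys for every index (nested j-loop), B builds per side a dict from fb-key to the group of opposite sides plus each row's position in its group in one pass, so each row's candidate list is just its group's suffix; on the benchmarked inputs this was not measurably faster, so no speed is claimed.
import Mathlib
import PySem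

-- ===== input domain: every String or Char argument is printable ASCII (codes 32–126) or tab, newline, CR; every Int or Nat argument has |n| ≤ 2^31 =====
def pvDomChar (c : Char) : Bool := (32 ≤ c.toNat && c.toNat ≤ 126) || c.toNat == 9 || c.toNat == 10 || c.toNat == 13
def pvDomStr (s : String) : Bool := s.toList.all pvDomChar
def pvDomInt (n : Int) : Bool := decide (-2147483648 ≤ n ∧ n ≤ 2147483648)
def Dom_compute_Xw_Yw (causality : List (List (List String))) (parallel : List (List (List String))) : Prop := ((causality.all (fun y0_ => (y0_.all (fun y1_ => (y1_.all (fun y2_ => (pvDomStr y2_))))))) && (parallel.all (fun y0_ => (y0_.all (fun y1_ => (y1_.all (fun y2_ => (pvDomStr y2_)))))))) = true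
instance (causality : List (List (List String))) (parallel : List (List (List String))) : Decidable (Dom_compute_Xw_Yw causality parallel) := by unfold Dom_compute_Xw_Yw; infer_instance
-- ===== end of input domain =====

-- B builds, per side fb, a dict from fb-key to the list of opposite sides plus each
-- row's position in its group, so each row's candidate list is read off as a group
-- suffix instead of rescanning the whole list per index (objective: alternative).
-- Return value only; neither version mutates its arguments observably.

-- row[fb] (fb is a Python int index into the row)
def pvKey (fb : Int) (r : List (List String)) : List String := PySem.List.pyGetD r fb []
-- row[1 - fb]
def pvOpp (fb : Int) (r : List (List String)) : List String := PySem.List.pyGetD r (1 - fb) []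

-- ===== PORT A =====
-- inner 'for i in range(len(X_w)): temp = []; for j in range(i, len(X_w)) …' pass of A
def pvPassA (X parallel : List (List (List String))) (fb : Int)
    (m : List (List (List String))) : List (List (List String)) :=
  (PySem.List.pyRange 0 (X.length : Int) 1).foldl (fun m i =>
    let temp := (PySem.List.pyRange i (X.length : Int) 1).foldl (fun t j =>
      if pvKey fb (PySem.List.pyGetD X i []) == pvKey fb (PySem.List.pyGetD X j []) then
        t ++ [pvOpp fb (PySem.List.pyGetD X j [])]
      else t) []
    if temp.length > 1 && !(parallel.contains temp) then
      if fb == 0 then m ++ [[pvKey fb (PySem.List.pyGetD X i []), temp.flatten]]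
      else m ++ [[temp.flatten, pvKey fb (PySem.List.pyGetD X i [])]]
    else m) m

def compute_Xw_Yw (causality : List (List (List String))) (parallel : List (List (List String))) : List (List (List String)) × List (List (List String)) :=
  let X_w := causality
  let merged := (PySem.List.pyRange 0 2 1).foldl (fun m fb => pvPassA X_w parallel fb m) []
  (X_w ++ merged, X_w ++ merged)

-- ===== PORT B =====
-- first pass of B: groups (dict key → opposite sides in order) and pos (position of
-- each row inside its group)
def pvBuild (fb : Int) (X : List (List (List String))) :
    PySem.Dict (List String) (List (List String)) × List Nat :=
  X.foldl (fun st row =>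
    let lst := st.1.getD (pvKey fb row) []
    (st.1.insert (pvKey fb row) (lst ++ [pvOpp fb row]), st.2 ++ [lst.length])) (PySem.Dict.empty, [])

-- second pass of B over enumerate(X_w); 'groups[…][pos[i]:]' is a drop at a
-- nonnegative position, exact as List.drop
def pvPassB (X parallel : List (List (List String))) (fb : Int)
    (m : List (List (List String))) : List (List (List String)) :=
  let gp := pvBuild fb X
  (PySem.List.enumerate X 0).foldl (fun m p =>
    let temp := (gp.1.getD (pvKey fb p.2) []).drop (PySem.List.pyGetD gp.2 p.1 0)
    if temp.length > 1 && !(parallel.contains temp) then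
      if fb == 0 then m ++ [[pvKey fb p.2, temp.flatten]]
      else m ++ [[temp.flatten, pvKey fb p.2]]
    else m) m

def compute_Xw_Yw_alt (causality : List (List (List String))) (parallel : List (List (List String))) : List (List (List String)) × List (List (List String)) :=
  let merged := (PySem.List.pyRange 0 2 1).foldl (fun m fb => pvPassB causality parallel fb m) []
  (causality ++ merged, causality ++ merged)

-- ===== PRECONDITION & SPEC =====
-- Pre_ excludes exactly the inputs on which Python raises IndexError: a causality row
-- shorter than 2, where row[0]/row[1] fails in both A and B.
def Pre_compute_Xw_Yw (causality : List (List (List String))) (parallel : List (List (List String))) : Prop :=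
  ∀ r ∈ causality, 2 ≤ r.length
instance (causality : List (List (List String))) (parallel : List (List (List String))) : Decidable (Pre_compute_Xw_Yw causality parallel) := by unfold Pre_compute_Xw_Yw; infer_instance
def pvWitness_compute_Xw_Yw : List (List (List String)) × List (List (List String)) :=
  ([[["a"], ["b"]], [["a"], ["c"]]], [])

def Spec_compute_Xw_Yw (causality : List (List (List String))) (parallel : List (List (List String))) (out : List (List (List String)) × List (List (List String))) : Prop := out = compute_Xw_Yw_alt causality parallel
instance (causality : List (List (List String))) (parallel : List (List (List String))) (out : List (List (List String)) × List (List (List String))) : Decidable (Spec_compute_Xw_Yw causality parallel out) := by unfold Spec_compute_Xw_Yw; infer_instance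

-- ===== CLAIM (what is proved, stated in full; the proofs are below) =====
def Claim_equal_compute_Xw_Yw : Prop := ∀ (causality : List (List (List String))) (parallel : List (List (List String))), Dom_compute_Xw_Yw causality parallel → Pre_compute_Xw_Yw causality parallel → Spec_compute_Xw_Yw causality parallel (compute_Xw_Yw causality parallel)

-- ===== LEMMAS AND PROOFS =====

-- groups after the build pass: exactly the opposite sides of the rows with that key
theorem pvBuild_fst (fb : Int) (X : List (List (List String))) (k : List String) :
    (pvBuild fb X).1.getD k [] = (X.filter (fun r => pvKey fb r == k)).map (pvOpp fb) := by
  induction X using List.reverseRecOn with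
  | nil => simp [pvBuild, PySem.Dict.getD_empty]
  | append_singleton X x ih =>
    unfold pvBuild at *
    rw [List.foldl_append]
    simp only [List.foldl_cons, List.foldl_nil, List.filter_append, List.map_append]
    by_cases h : pvKey fb x = k
    · subst h
      rw [PySem.Dict.getD_insert_self, ih]
      simp
    · rw [PySem.Dict.getD_insert_of_ne _ _ _ (Ne.symm h), ih]
      simp [h]

-- pos after the build pass
theorem pvBuild_snd (fb : Int) (X : List (List (List String))) :
    (pvBuild fb X).2
      = (List.range X.length).map
          (fun i => ((X.take i).filter (fun r => pvKey fb r == pvKey fb (X.getD i []))).length) := by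
  induction X using List.reverseRecOn with
  | nil => simp [pvBuild]
  | append_singleton X x ih =>
    have hfst := pvBuild_fst fb X (pvKey fb x)
    unfold pvBuild at *
    rw [List.foldl_append]
    simp only [List.foldl_cons, List.foldl_nil]
    rw [ih, hfst]
    rw [List.length_append, List.length_singleton, List.range_succ, List.map_append]
    congr 1
    · apply List.map_congr_left
      intro i hi
      rw [List.mem_range] at hi
      rw [List.take_append_of_le_length (le_of_lt hi), List.getD_append _ _ _ _ hi]
    · simp

theorem drop_filter_count {α β : Type} (p : α → Bool) (f : α → β) (Y Z : List α) :
    (List.map f ((Y ++ Z).filter p)).drop ((Y.filter p).length) = List.map f (Z.filter p) := by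
  rw [List.filter_append, List.map_append, List.drop_left' (by simp)]

theorem filter_key_flip (fb : Int) (k : List String) (l : List (List (List String))) :
    l.filter (fun r => k == pvKey fb r) = l.filter (fun r => pvKey fb r == k) := by
  apply List.filter_congr
  intro r _
  by_cases h : k = pvKey fb r
  · subst h; rfl
  · rw [beq_eq_false_iff_ne.mpr h, beq_eq_false_iff_ne.mpr (Ne.symm h)]

theorem pass_eq (X parallel : List (List (List String))) (fb : Int) (m : List (List (List String))) :
    pvPassA X parallel fb m = pvPassB X parallel fb m := by
  unfold pvPassA pvPassB
  rw [PySem.List.enumerate_eq_map_pyRange X [], List.foldl_map]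
  apply PySem.List.foldl_congr_mem
  intro acc i hi
  rw [PySem.List.mem_pyRange_one] at hi
  obtain ⟨h0, hn⟩ := hi
  have hit : i.toNat < X.length := by omega
  have hgetX : PySem.List.pyGetD X i [] = X.getD i.toNat [] := PySem.List.pyGetD_of_nonneg X [] h0
  have hA : (PySem.List.pyRange i (X.length : Int) 1).foldl (fun t j =>
        if pvKey fb (PySem.List.pyGetD X i []) == pvKey fb (PySem.List.pyGetD X j []) then
          t ++ [pvOpp fb (PySem.List.pyGetD X j [])] else t) []
      = ((X.drop i.toNat).filter
          (fun r => pvKey fb r == pvKey fb (X.getD i.toNat []))).map (pvOpp fb) := by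
    rw [PySem.List.foldl_pyRange_pyGetD' X []
          (fun t r => if pvKey fb (PySem.List.pyGetD X i []) == pvKey fb r then
            t ++ [pvOpp fb r] else t) [] h0,
        PySem.List.foldl_append_if, hgetX, filter_key_flip]
    simp
  have hB : ((pvBuild fb X).1.getD (pvKey fb (PySem.List.pyGetD X i [])) []).drop
        (PySem.List.pyGetD (pvBuild fb X).2 i 0)
      = ((X.drop i.toNat).filter
          (fun r => pvKey fb r == pvKey fb (X.getD i.toNat []))).map (pvOpp fb) := by
    rw [hgetX, pvBuild_fst, pvBuild_snd, PySem.List.pyGetD_of_nonneg _ _ h0,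
        PySem.List.getD_map_range _ _ _ _ hit]
    have h := drop_filter_count (fun r => pvKey fb r == pvKey fb (X.getD i.toNat []))
        (pvOpp fb) (X.take i.toNat) (X.drop i.toNat)
    rw [List.take_append_drop] at h
    exact h
  rw [hgetX] at hA hB
  simp only [hgetX, hA, hB]

-- ===== VERDICT (by name: the statement is the Claim_ definition above) =====
theorem compute_Xw_Yw_spec : Claim_equal_compute_Xw_Yw := by
  intro c p _ _
  unfold Spec_compute_Xw_Yw compute_Xw_Yw compute_Xw_Yw_alt
  simp only [pass_eq]
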